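-- pv_equiv track=rewrite | github.com/wlzshmily/commodity-option-data-manager | src/option_data_manager/cli/collect_market.py | _collection_status
-- ===== SOURCE A (Python) =====
-- from collections.abc import Callable, Mapping
-- from typing import Any
--
-- def _collection_status(result: Mapping[str, Any]) -> str:
--     statuses = {
--         item.get("collection_batch_status")
--         for item in result["results"]
--     }
--     if not statuses:
--         return "empty_window"
--     if statuses == {"success"}:
--         return "success"
--     if "failed" in statuses:
--         return "failed"
--     return "partial_failure"
-- ===== SOURCE B (Python) =====
-- _RANK = {"success": 0, "failed": 2}
-- _LABEL = ("success", "partial_failure", "failed")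
--
-- def _collection_status(result):
--     ranks = [_RANK.get(item.get("collection_batch_status"), 1)
--              for item in result["results"]]
--     return _LABEL[max(ranks)] if ranks else "empty_window"
-- ===== Notes on version B (the rewrite author's own statement) =====
-- stated objective: alternative
-- what changed: Replaces the set comprehension plus the empty/equal-to-{success}/contains-failed decision cascade by a severity-rank reduction: each item is mapped to a rank (success=0, failed=2, other=1), the maximum rank is taken, and the answer is read off a label table indexed by that maximum.
-- outside the precondition, e.g. on _collection_status({}): A raises KeyError, B raises KeyError
import Mathlib
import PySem

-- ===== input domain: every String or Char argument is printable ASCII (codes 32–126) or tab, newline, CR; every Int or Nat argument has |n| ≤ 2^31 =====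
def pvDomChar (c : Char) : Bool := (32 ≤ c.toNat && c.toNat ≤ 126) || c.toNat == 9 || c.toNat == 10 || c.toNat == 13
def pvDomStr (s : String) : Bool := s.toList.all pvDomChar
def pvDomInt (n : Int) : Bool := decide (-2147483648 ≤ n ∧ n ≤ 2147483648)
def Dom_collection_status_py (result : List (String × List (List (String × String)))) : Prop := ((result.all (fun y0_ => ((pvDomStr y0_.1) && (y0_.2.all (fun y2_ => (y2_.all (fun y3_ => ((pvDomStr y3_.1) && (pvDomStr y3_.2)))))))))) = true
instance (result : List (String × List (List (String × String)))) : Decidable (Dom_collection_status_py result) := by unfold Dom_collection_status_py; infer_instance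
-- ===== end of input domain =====

-- B replaces A's status-set and decision cascade by a severity-rank maximum read off a label table (alternative decomposition; same O(n) cost).

-- ===== PORT A =====
def collection_status_py (result : List (String × List (List (String × String)))) : String :=
  let items := ((PySem.Dict.mk result).get? "results").getD []   -- result["results"]; KeyError excluded by Pre_
  let statuses : PySem.Set (Option String) :=
    PySem.Set.ofList (items.map (fun item => (PySem.Dict.mk item).get? "collection_batch_status"))
  if statuses = [] then "empty_window"
  else if PySem.Set.equal statuses (PySem.Set.ofList [some "success"]) then "success"
  else if PySem.Set.contains statuses (some "failed") then "failed"
  else "partial_failure"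

-- ===== PORT B =====
-- module constants _RANK and _LABEL of Source B
def pvRank : PySem.Dict (Option String) Int := PySem.Dict.mk [(some "success", 0), (some "failed", 2)]
def pvLabel : List String := ["success", "partial_failure", "failed"]

def collection_status_py_alt (result : List (String × List (List (String × String)))) : String :=
  let items := ((PySem.Dict.mk result).get? "results").getD []   -- result["results"]; KeyError excluded by Pre_
  let ranks : List Int := items.map (fun item =>
    pvRank.getD ((PySem.Dict.mk item).get? "collection_batch_status") 1)
  if ranks = [] then "empty_window"
  else
    -- _LABEL[max(ranks)]: max over a nonempty list, index always in 0..2 so getD is never hit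
    ((PySem.List.pyGet? pvLabel ((PySem.List.max? ranks (fun y => y)).getD 0)).getD "")

-- ===== PRECONDITION & SPEC =====
-- Pre_ excludes exactly the inputs where result["results"] raises KeyError in A (and in B).
def Pre_collection_status_py (result : List (String × List (List (String × String)))) : Prop :=
  (PySem.Dict.mk result).contains "results" = true
instance (result : List (String × List (List (String × String)))) : Decidable (Pre_collection_status_py result) := by unfold Pre_collection_status_py; infer_instance
def pvWitness_collection_status_py : (List (String × List (List (String × String)))) := [("results", [])]

def Spec_collection_status_py (result : List (String × List (List (String × String)))) (out : String) : Prop := out = collection_status_py_alt result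
instance (result : List (String × List (List (String × String)))) (out : String) : Decidable (Spec_collection_status_py result out) := by unfold Spec_collection_status_py; infer_instance

-- ===== CLAIM =====
def Claim_equal_collection_status_py : Prop := ∀ (result : List (String × List (List (String × String)))), Dom_collection_status_py result → Pre_collection_status_py result → Spec_collection_status_py result (collection_status_py result)

-- ===== LEMMAS AND PROOFS =====

-- the rank table as a closed formula
lemma rank_spec (s : Option String) :
    pvRank.getD s 1 = (if s = some "success" then 0 else if s = some "failed" then 2 else 1) := by
  rcases s with _ | v
  · simp [pvRank, PySem.Dict.getD, PySem.Dict.get?]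
  · by_cases h1 : v = "success"
    · simp [pvRank, PySem.Dict.getD, PySem.Dict.get?, h1]
    · by_cases h2 : v = "failed"
      · simp [pvRank, PySem.Dict.getD, PySem.Dict.get?, h2]
      · have e1 : ("success" == v) = false := by simp [Ne.symm h1]
        have e2 : ("failed" == v) = false := by simp [Ne.symm h2]
        simp [pvRank, PySem.Dict.getD, PySem.Dict.get?, List.find?, e1, e2, h1, h2]

lemma ofList_eq_nil_iff {α : Type} [BEq α] [LawfulBEq α] (xs : List α) :
    PySem.Set.ofList xs = [] ↔ xs = [] := by
  constructor
  · intro h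
    cases xs with
    | nil => rfl
    | cons x t =>
      have hm := (PySem.Set.mem_ofList (x :: t) x).mpr (List.mem_cons_self)
      rw [h] at hm
      cases hm
  · intro h; subst h; rfl

-- ===== VERDICT =====

theorem collection_status_py_spec : Claim_equal_collection_status_py := by
  intro result _ _
  unfold Spec_collection_status_py collection_status_py collection_status_py_alt
  set items := ((PySem.Dict.mk result).get? "results").getD [] with hitems
  set f : List (String × String) → Option String :=
    fun item => (PySem.Dict.mk item).get? "collection_batch_status" with hf
  cases h : items with
  | nil => simp
  | cons x t =>
    have hne : items ≠ [] := by simp [h]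
    have hrne : items.map (fun item => pvRank.getD (f item) 1) ≠ [] := by simp [h]
    have hsne : PySem.Set.ofList (items.map f) ≠ [] := by
      rw [Ne, ofList_eq_nil_iff]; simp [h]
    rw [← h]
    rw [if_neg hsne, if_neg hrne]
    -- the maximum rank m
    obtain ⟨m, hm⟩ : ∃ m, PySem.List.max? (items.map (fun item => pvRank.getD (f item) 1)) (fun y => y) = some m := by
      cases hmx : PySem.List.max? (items.map (fun item => pvRank.getD (f item) 1)) (fun y => y) with
      | none => exact absurd ((PySem.List.max?_eq_none_iff _ _).mp hmx) hrne
      | some m => exact ⟨m, rfl⟩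
    have hmem : m ∈ items.map (fun item => pvRank.getD (f item) 1) := PySem.List.max?_mem hm
    have hub : ∀ y ∈ items.map (fun item => pvRank.getD (f item) 1), y ≤ m := by
      intro y hy; exact PySem.List.max?_isMax hm y hy
    rw [hm]
    by_cases hall : ∀ it ∈ items, f it = some "success"
    · -- all success: m = 0, both return "success"
      have hm0 : m = 0 := by
        rcases List.mem_map.mp hmem with ⟨it, hit, hv⟩
        rw [rank_spec, if_pos (hall it hit)] at hv
        omega
      have heq : PySem.Set.equal (PySem.Set.ofList (items.map f)) (PySem.Set.ofList [some "success"]) = true := by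
        rw [PySem.Set.equal_iff]
        intro y
        simp only [PySem.Set.mem_ofList _ _, List.mem_map, List.mem_singleton]
        constructor
        · rintro ⟨it, hit, rfl⟩; exact hall it hit
        · rintro rfl; exact ⟨x, by simp [h], hall x (by simp [h])⟩
      rw [if_pos heq, hm0]
      simp [pvLabel, PySem.List.pyGet?, PySem.List.pyIdx?]
    · push Not at hall
      obtain ⟨it₀, hit₀, hns⟩ := hall
      have heq : PySem.Set.equal (PySem.Set.ofList (items.map f)) (PySem.Set.ofList [some "success"]) = false := by
        rw [Bool.eq_false_iff, Ne, PySem.Set.equal_iff]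
        intro hco
        apply hns
        have : f it₀ ∈ PySem.Set.ofList (items.map f) :=
          (PySem.Set.mem_ofList _ _).mpr (List.mem_map.mpr ⟨it₀, hit₀, rfl⟩)
        have := (hco _).mp this
        simpa [PySem.Set.mem_ofList _ _] using this
      rw [if_neg (by simp [heq])]
      by_cases hfail : ∃ it ∈ items, f it = some "failed"
      · -- some failed: m = 2, both return "failed"
        obtain ⟨it₁, hit₁, hv₁⟩ := hfail
        have h2le : (2 : Int) ≤ m := by
          have : pvRank.getD (f it₁) 1 ≤ m :=
            hub _ (List.mem_map.mpr ⟨it₁, hit₁, rfl⟩)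
          rw [rank_spec, hv₁] at this
          simpa using this
        have hle2 : m ≤ 2 := by
          rcases List.mem_map.mp hmem with ⟨it, hit, hv⟩
          rw [rank_spec] at hv
          split_ifs at hv <;> omega
        have hm2 : m = 2 := le_antisymm hle2 h2le
        have hcon : PySem.Set.contains (PySem.Set.ofList (items.map f)) (some "failed") = true := by
          rw [PySem.Set.contains_iff _ _, PySem.Set.mem_ofList _ _]
          exact List.mem_map.mpr ⟨it₁, hit₁, hv₁⟩
        rw [if_pos hcon, hm2]
        simp [pvLabel, PySem.List.pyGet?, PySem.List.pyIdx?]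
      · -- no failed, not all success: m = 1, both return "partial_failure"
        push Not at hfail
        have h1le : (1 : Int) ≤ m := by
          have : pvRank.getD (f it₀) 1 ≤ m :=
            hub _ (List.mem_map.mpr ⟨it₀, hit₀, rfl⟩)
          rw [rank_spec, if_neg hns] at this
          split_ifs at this <;> omega
        have hle1 : m ≤ 1 := by
          rcases List.mem_map.mp hmem with ⟨it, hit, hv⟩
          rw [rank_spec] at hv
          have := hfail it hit
          split_ifs at hv <;> omega
        have hm1 : m = 1 := le_antisymm hle1 h1le
        have hcon : PySem.Set.contains (PySem.Set.ofList (items.map f)) (some "failed") = false := by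
          rw [Bool.eq_false_iff, Ne, PySem.Set.contains_iff _ _, PySem.Set.mem_ofList _ _]
          intro hmem'
          rcases List.mem_map.mp hmem' with ⟨it, hit, hv⟩
          exact absurd hv (hfail it hit)
        rw [if_neg (by simp only [hcon]; exact Bool.false_ne_true), hm1]
        simp [pvLabel, PySem.List.pyGet?, PySem.List.pyIdx?]
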